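-- pv_equiv track=rewrite | github.com/pshee-dev/Bookmark | backend/recommendations/my_source/summary/summarizer/summarize_user_reviews.py | make_user_bundle_text
-- ===== SOURCE A (Python) =====
-- def make_user_bundle_text(reviews, max_reviews=30, max_chars=6000):
--     buf, total = [], 0
--     for r in reviews[:max_reviews]:
--         r = str(r).strip()
--         if not r:
--             continue
--         total += len(r)
--         if total > max_chars:
--             break
--         buf.append(f"- {r}")
--     return "\n".join(buf)
-- ===== SOURCE B (Python) =====
-- def make_user_bundle_text(reviews, max_reviews=30, max_chars=6000):
--     items = [s for s in (str(r).strip() for r in reviews[:max_reviews]) if s]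
--     cums = []
--     t = 0
--     for s in items:
--         t += len(s)
--         cums.append(t)
--     kept = ["- " + s for s, c in zip(items, cums) if c <= max_chars]
--     return "\n".join(kept)
-- ===== Notes on version B (the rewrite author's own statement) =====
-- stated objective: alternative
-- what changed: Replaces A's single accumulate-and-break loop with mutable buf/total state by a pipeline: clean the capped reviews, build the prefix-sum table of their lengths, keep the entries whose cumulative length fits the budget (a true prefix since lengths are nonnegative), and join.
import Mathlib
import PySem

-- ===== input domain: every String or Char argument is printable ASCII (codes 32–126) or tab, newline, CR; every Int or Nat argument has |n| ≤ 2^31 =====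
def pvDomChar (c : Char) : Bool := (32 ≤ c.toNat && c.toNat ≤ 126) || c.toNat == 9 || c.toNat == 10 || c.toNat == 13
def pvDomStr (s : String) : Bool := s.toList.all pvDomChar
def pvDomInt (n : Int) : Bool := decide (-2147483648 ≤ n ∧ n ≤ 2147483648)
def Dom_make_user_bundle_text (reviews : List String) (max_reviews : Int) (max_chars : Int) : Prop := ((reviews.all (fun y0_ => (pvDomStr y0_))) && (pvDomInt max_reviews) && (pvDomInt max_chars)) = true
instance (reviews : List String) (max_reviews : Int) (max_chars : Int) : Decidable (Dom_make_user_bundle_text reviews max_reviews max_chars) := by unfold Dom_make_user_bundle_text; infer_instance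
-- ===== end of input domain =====

-- B replaces A's accumulate-and-break loop by a clean/prefix-sum/filter/join pipeline (objective: alternative decomposition, same cost).

-- ===== PORT A =====
-- f"- {r}"  (String.mk on code points; exact for any string)
def pvDash (s : String) : String := String.ofList ('-' :: ' ' :: s.toList)

-- the 'for r in reviews[:max_reviews]' loop with its buf/total state and break
def pvALoop (mc : Int) : List String → List String → Int → List String
  | [], buf, _ => buf
  | r :: rest, buf, total =>
    let r' := PySem.Str.strip r
    if r' = "" then pvALoop mc rest buf total
    else
      let total' := total + PySem.Str.len r'
      if total' > mc then buf
      else pvALoop mc rest (buf ++ [pvDash r']) total'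

def make_user_bundle_text (reviews : List String) (max_reviews : Int) (max_chars : Int) : String :=
  PySem.Str.join "\n" (pvALoop max_chars (PySem.List.slice reviews none (some max_reviews)) [] 0)

-- ===== PORT B =====
-- cums: the running-total list built by B's accumulation loop
def pvCums (t : Int) : List String → List Int
  | [] => []
  | s :: rest => (t + PySem.Str.len s) :: pvCums (t + PySem.Str.len s) rest

def make_user_bundle_text_alt (reviews : List String) (max_reviews : Int) (max_chars : Int) : String :=
  let items := ((PySem.List.slice reviews none (some max_reviews)).map PySem.Str.strip).filter (fun s => s != "")
  let kept := ((items.zip (pvCums 0 items)).filter (fun p => p.2 ≤ max_chars)).map (fun p => pvDash p.1)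
  PySem.Str.join "\n" kept

-- ===== PRECONDITION & SPEC =====
def Spec_make_user_bundle_text (reviews : List String) (max_reviews : Int) (max_chars : Int) (out : String) : Prop := out = make_user_bundle_text_alt reviews max_reviews max_chars
instance (reviews : List String) (max_reviews : Int) (max_chars : Int) (out : String) : Decidable (Spec_make_user_bundle_text reviews max_reviews max_chars out) := by unfold Spec_make_user_bundle_text; infer_instance

-- ===== CLAIM (what is proved, stated in full; the proofs are below) =====
def Claim_equal_make_user_bundle_text : Prop := ∀ (reviews : List String) (max_reviews : Int) (max_chars : Int), Dom_make_user_bundle_text reviews max_reviews max_chars → Spec_make_user_bundle_text reviews max_reviews max_chars (make_user_bundle_text reviews max_reviews max_chars)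

-- ===== LEMMAS AND PROOFS =====

theorem pvLen_nonneg (s : String) : 0 ≤ PySem.Str.len s := by
  simp [PySem.Str.len_eq]

theorem pvCums_ge (xs : List String) (t : Int) : ∀ c ∈ pvCums t xs, t ≤ c := by
  induction xs generalizing t with
  | nil => simp [pvCums]
  | cons s rest ih =>
    intro c hc
    simp only [pvCums, List.mem_cons] at hc
    rcases hc with h | h
    · have := pvLen_nonneg s; omega
    · have := ih (t + PySem.Str.len s) c h
      have := pvLen_nonneg s; omega

theorem pvFilter_nil (mc : Int) (rest : List String) (t : Int) (h : mc < t) :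
    (rest.zip (pvCums t rest)).filter (fun p => p.2 ≤ mc) = [] := by
  rw [List.filter_eq_nil_iff]
  intro p hp
  have h2 := List.of_mem_zip hp
  have := pvCums_ge rest t p.2 h2.2
  simp only [decide_eq_true_eq]
  omega

theorem pvKey (mc : Int) (xs : List String) : ∀ (buf : List String) (t : Int),
    pvALoop mc xs buf t =
      buf ++ ((((xs.map PySem.Str.strip).filter (fun s => s != "")).zip
        (pvCums t ((xs.map PySem.Str.strip).filter (fun s => s != "")))).filter
          (fun p => p.2 ≤ mc)).map (fun p => pvDash p.1) := by
  induction xs with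
  | nil => intro buf t; simp [pvALoop, pvCums]
  | cons x rest ih =>
    intro buf t
    by_cases hx : PySem.Str.strip x = ""
    · simp only [pvALoop, hx, List.map_cons, List.filter_cons, bne_self_eq_false,
        Bool.false_eq_true, reduceIte]
      exact ih buf t
    · have hne : (PySem.Str.strip x != "") = true := by simp [hx]
      simp only [pvALoop, if_neg hx, List.map_cons, List.filter_cons, hne, if_pos]
      by_cases hgt : t + PySem.Str.len (PySem.Str.strip x) > mc
      · rw [if_pos hgt]
        simp only [pvCums, List.zip_cons_cons, List.filter_cons]
        have hhead : ¬ (t + PySem.Str.len (PySem.Str.strip x) ≤ mc) := by omega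
        simp only [decide_eq_true_eq, hhead, reduceIte]
        rw [pvFilter_nil mc _ _ (by omega)]
        simp
      · rw [if_neg hgt]
        rw [ih (buf ++ [pvDash (PySem.Str.strip x)]) (t + PySem.Str.len (PySem.Str.strip x))]
        simp only [pvCums, List.zip_cons_cons, List.filter_cons]
        have hc : t + PySem.Str.len (PySem.Str.strip x) ≤ mc := by omega
        simp only [pysem] at hc
        simp [hc]

-- ===== VERDICT (by name: the statement is the Claim_ definition above) =====
theorem make_user_bundle_text_spec : Claim_equal_make_user_bundle_text := by
  intro reviews mr mc _
  unfold Spec_make_user_bundle_text make_user_bundle_text make_user_bundle_text_alt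
  rw [pvKey]
  simp
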